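-- pv_equiv track=rewrite | github.com/niklasw/toolbox | python/programs/square-spiral.py | walk_dir
-- ===== SOURCE A (Python) =====
-- def walk_dir(n, axis: int = 0):
--     """Returns list of tuples, (direction, n_steps).
--     direction tells if the step size should be -1, 0 or 1 along the axis
--     defined by the axis attribute (0 or 1 for x or y respectively).
--     n_steps tells how many steps to taken."""
--     sign = 1
--     steps = 0
--     for i in range(n):
--         d = ((i + axis) % 2) * sign
--         if i % 2 == 0:
--             sign *= -1
--             steps += 1
--         yield (d, steps)
-- ===== SOURCE B (Python) =====
-- def walk_dir(n, axis: int = 0):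
--     """Same tuples as A, but each computed as a closed form of the index:
--     no running sign/steps state."""
--     for i in range(n):
--         sign = -1 if ((i + 1) // 2) % 2 == 1 else 1
--         yield (((i + axis) % 2) * sign, i // 2 + 1)
-- ===== Notes on version B (the rewrite author's own statement) =====
-- stated objective: alternative
-- what changed: Replaces the stateful loop threading a running sign and step counter with a stateless closed form of the index i: steps is i//2 + 1 and the sign flips on the parity of (i+1)//2, so each yielded tuple is computed independently of the previous ones.
import Mathlib
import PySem

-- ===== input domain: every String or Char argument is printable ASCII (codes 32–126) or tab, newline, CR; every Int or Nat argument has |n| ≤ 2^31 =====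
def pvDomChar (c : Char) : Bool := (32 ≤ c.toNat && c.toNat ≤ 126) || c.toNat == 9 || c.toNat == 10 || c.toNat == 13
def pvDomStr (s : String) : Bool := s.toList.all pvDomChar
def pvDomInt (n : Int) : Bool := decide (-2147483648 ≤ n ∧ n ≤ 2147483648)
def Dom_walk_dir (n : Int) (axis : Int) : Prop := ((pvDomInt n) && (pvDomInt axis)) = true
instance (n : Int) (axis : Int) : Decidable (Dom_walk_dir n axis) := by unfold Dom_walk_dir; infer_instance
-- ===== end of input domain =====

-- B replaces A's running sign/steps state with a stateless closed form of the loop index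
-- (steps = i//2 + 1, sign = (-1)^((i+1)//2)); alternative decomposition, same O(n) cost.
-- A is a Python generator; both ports return the list of yielded tuples.


-- ===== PORT A =====
-- the generator's loop: state (sign, steps) threaded through the iteration,
-- d read before the even-index flip, exactly as in the Python
def walkA_loop (axis : Int) : List Int → Int → Int → List (Int × Int)
  | [], _, _ => []
  | i :: rest, sign, steps =>
    let d := PySem.Int.mod (i + axis) 2 * sign
    if PySem.Int.mod i 2 = 0 then
      (d, steps + 1) :: walkA_loop axis rest (sign * -1) (steps + 1)
    else
      (d, steps) :: walkA_loop axis rest sign steps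

def walk_dir (n : Int) (axis : Int) : List (Int × Int) :=
  walkA_loop axis (PySem.List.pyRange 0 n 1) 1 0

-- ===== PORT B =====
def walk_dir_alt (n : Int) (axis : Int) : List (Int × Int) :=
  (PySem.List.pyRange 0 n 1).map (fun i =>
    (PySem.Int.mod (i + axis) 2 *
       (if PySem.Int.mod (PySem.Int.floordiv (i + 1) 2) 2 = 1 then -1 else 1),
     PySem.Int.floordiv i 2 + 1))

-- ===== PRECONDITION & SPEC =====
def Spec_walk_dir (n : Int) (axis : Int) (out : List (Int × Int)) : Prop := out = walk_dir_alt n axis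
instance (n : Int) (axis : Int) (out : List (Int × Int)) : Decidable (Spec_walk_dir n axis out) := by unfold Spec_walk_dir; infer_instance

-- ===== CLAIM (what is proved, stated in full; the proofs are below) =====
def Claim_equal_walk_dir : Prop := ∀ (n : Int) (axis : Int), Dom_walk_dir n axis → Spec_walk_dir n axis (walk_dir n axis)

-- ===== LEMMAS AND PROOFS =====

-- loop invariant: entering iteration i = m, sign = (-1)^((m+1)/2) and steps = (m+1)/2
theorem walkA_loop_eq (axis : Int) (k : Nat) : ∀ (m : Nat),
    walkA_loop axis ((List.range' m k).map (fun j : Nat => (j : Int)))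
      (if ((m + 1) / 2) % 2 = 1 then -1 else 1) (((m + 1) / 2 : Nat) : Int)
    = ((List.range' m k).map (fun j : Nat => (j : Int))).map (fun i =>
        (PySem.Int.mod (i + axis) 2 *
           (if PySem.Int.mod (PySem.Int.floordiv (i + 1) 2) 2 = 1 then -1 else 1),
         PySem.Int.floordiv i 2 + 1)) := by
  induction k with
  | zero => intro m; simp [List.range'_zero, List.map_nil, walkA_loop]
  | succ k ih =>
    intro m
    rw [List.range'_succ]
    simp only [List.map_cons, walkA_loop]
    have hfd : PySem.Int.floordiv ((m : Int) + 1) 2 = (((m + 1) / 2 : Nat) : Int) := by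
      exact_mod_cast PySem.Int.floordiv_natCast (m + 1) 2
    have hfd2 : PySem.Int.floordiv (m : Int) 2 = ((m / 2 : Nat) : Int) := by
      exact_mod_cast PySem.Int.floordiv_natCast m 2
    have hmod : PySem.Int.mod (m : Int) 2 = ((m % 2 : Nat) : Int) := by
      exact_mod_cast PySem.Int.mod_natCast m 2
    have hmod2 : PySem.Int.mod (((m + 1) / 2 : Nat) : Int) 2 = ((((m + 1) / 2) % 2 : Nat) : Int) := by
      exact_mod_cast PySem.Int.mod_natCast ((m + 1) / 2) 2
    have hcond : (((((m + 1) / 2) % 2 : Nat) : Int) = 1) ↔ (((m + 1) / 2) % 2 = 1) := by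
      constructor <;> intro h <;> exact_mod_cast h
    by_cases hm : m % 2 = 0
    · have h0 : PySem.Int.mod (m : Int) 2 = 0 := by rw [hmod, hm]; rfl
      rw [if_pos h0, hfd, hfd2, hmod2]
      have hsign : (if ((m + 1) / 2) % 2 = 1 then (-1 : Int) else 1) * -1
          = (if ((m + 1 + 1) / 2) % 2 = 1 then (-1 : Int) else 1) := by
        have h1 : (m + 1 + 1) / 2 = (m + 1) / 2 + 1 := by omega
        rw [h1]
        by_cases h : ((m + 1) / 2) % 2 = 1
        · rw [if_pos h, if_neg (by omega)]; ring
        · rw [if_neg h, if_pos (by omega)]; ring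
      have hnext : (((m + 1) / 2 : Nat) : Int) + 1 = (((m + 1 + 1) / 2 : Nat) : Int) := by
        have h1 : (m + 1 + 1) / 2 = (m + 1) / 2 + 1 := by omega
        rw [h1]; push_cast; ring
      congr 1
      · have h12 : (m + 1) / 2 = m / 2 := by omega
        have hsteps : (((m + 1) / 2 : Nat) : Int) + 1 = ((m / 2 : Nat) : Int) + 1 := by rw [h12]
        by_cases hc : ((m + 1) / 2) % 2 = 1
        · rw [if_pos hc, if_pos (hcond.mpr hc), hsteps]
        · rw [if_neg hc, if_neg (fun h => hc (hcond.mp h)), hsteps]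
      · rw [hsign, hnext]; exact ih (m + 1)
    · have hm1 : m % 2 = 1 := by omega
      have h1 : PySem.Int.mod (m : Int) 2 ≠ 0 := by rw [hmod, hm1]; decide
      rw [if_neg h1, hfd, hfd2, hmod2]
      congr 1
      · have h12 : (m + 1) / 2 = m / 2 + 1 := by omega
        have hsteps : (((m + 1) / 2 : Nat) : Int) = ((m / 2 : Nat) : Int) + 1 := by
          rw [h12]; push_cast; ring
        by_cases hc : ((m + 1) / 2) % 2 = 1
        · rw [if_pos hc, if_pos (hcond.mpr hc), hsteps]
        · rw [if_neg hc, if_neg (fun h => hc (hcond.mp h)), hsteps]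
      · have hs : (m + 1 + 1) / 2 = (m + 1) / 2 := by omega
        have h := ih (m + 1)
        rw [hs] at h
        exact h

-- ===== VERDICT (by name: the statement is the Claim_ definition above) =====
theorem walk_dir_spec : Claim_equal_walk_dir := by
  intro n axis _
  unfold Spec_walk_dir walk_dir walk_dir_alt
  rw [PySem.List.pyRange_one]
  simp only [Int.sub_zero]
  have hl : (List.range n.toNat).map (fun k : Nat => (0 : Int) + (k : Int))
      = (List.range' 0 n.toNat).map (fun j : Nat => (j : Int)) := by
    simp [List.range_eq_range']
  rw [hl]
  exact walkA_loop_eq axis n.toNat 0
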